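-- pv_equiv track=rewrite | github.com/YoavY1991/Project-Euler | Euler Problems/Problem 17.py | lenginnum
-- ===== SOURCE A (Python) =====
-- def lenginnum(s, e):
--     '''Returns the number of letters needed to write all numbers in range.this function is
--     limited up to 1000'''
--     dic = {1: 'one', 2: 'two', 3: 'three', 4: 'four', 5: 'five', 6: 'six', 7: 'seven', 8: 'eight',
--            9: 'nine', 10: 'ten', 11: 'eleven', 12: 'twelve', 13: 'thirteen', 14: 'fourteen',
--            15: 'fifteen', 16: 'sixteen', 17: 'seventeen', 18: 'eighteen', 19: 'nineteen',
--            20: 'twenty', 30: 'thirty', 40: 'forty', 50: 'fifty', 60: 'sixty', 70: 'seventy',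
--            80: 'eighty', 90: 'ninety', 100: 'hundred', 1000: 'thousand'}
--
--     string = []
--     for x in range(s, e + 1):
--         if len(str(x)) == 1:
--             string.append(dic.get(x))
--         elif 9 < x < 20:
--             string.append(dic.get(x))
--         elif len(str(x)) == 2 and int(str(x)[1]) == 0:
--             string.append(dic.get(x))
--         elif len(str(x)) == 2:
--             string.append(str(dic.get(int(str(x)[0] + '0'))) + str(dic.get(int(str(x)[1]))))
--         elif len(str(x)) == 3 and int(str(x)[1]) == 0 and int(str(x)[2]) == 0:
--             string.append(str(dic.get(int(str(x)[0])) + 'hundred'))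
--
--         elif len(str(x)) == 3 and int(str(x)[1]) == 0 and int(str(x)[2]) != 0:
--             string.append(
--                 str(dic.get(int(str(x)[0]))) + 'hundred' + 'and' + (dic.get(int(str(x)[2]))))
--
--         elif len(str(x)) == 3 and int(str(x)[1]) == 1:
--             string.append(str(dic.get(int(str(x)[0]))) + 'hundred' + 'and' + (
--                 dic.get(int(str(str(x)[1]) + (str(x)[2])))))
--
--         elif len(str(x)) == 3 and int(str(x)[1]) != 0 and int(str(x)[2]) == 0:
--             string.append(
--                 str(dic.get(int(str(x)[0])) + 'hundred' + 'and' + str(dic.get(int(str(x)[1:])))))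
--         elif len(str(x)) == 3 and int(str(x)[1]) != 0 and int(str(x)[2]) != 0:
--             string.append(str(dic.get(int(str(x)[0])) + 'hundred' + 'and' + str(
--                 dic.get(int(str(x)[1] + '0'))) + str(dic.get(int(str(x)[2])))))
--         elif len(str(x)) == 4 and int(str(x)[1]) == 0 and int(str(x)[2]) == 0 and int(
--                 str(x)[3]) == 0:
--             string.append((str(dic.get(int(str(x)[0])) + (str(dic.get(x))))))
--         else:
--             string.append('notsupportednumber')
--
--     sumis = 0
--     for x in string:
--         sumis += len(x)
--
--     return sumis
-- ===== SOURCE B (Python) =====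
-- # Closed-form per-number letter counts + a module-level prefix-sum table over 1..1000:
-- # each call is an O(1) table lookup instead of A's per-number string building over the range.
-- _ONES = [0, 3, 3, 5, 4, 4, 3, 5, 5, 4, 3, 6, 6, 8, 8, 7, 7, 9, 8, 8]  # '', 'one', ..., 'nineteen'
-- _TENS = [0, 0, 6, 6, 5, 5, 5, 7, 6, 6]  # '', '', 'twenty', ..., 'ninety'
--
--
-- def _letters(n):
--     """Letters to spell n (British 'and'), for 1 <= n <= 1000."""
--     if n == 1000:
--         return 11  # 'onethousand'
--     h, r = divmod(n, 100)
--     total = _ONES[h] + 7 + (3 if r else 0) if h else 0  # 'Xhundred' (+ 'and')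
--     if r < 20:
--         return total + _ONES[r]
--     t, u = divmod(r, 10)
--     return total + _TENS[t] + _ONES[u]
--
--
-- _PREFIX = [0]
-- for _n in range(1, 1001):
--     _PREFIX.append(_PREFIX[-1] + _letters(_n))
--
--
-- def lenginnum(s, e):
--     '''Returns the number of letters needed to write all numbers in range.this function is
--     limited up to 1000'''
--     lo = max(s, 1)
--     hi = min(e, 1000)
--     return _PREFIX[hi] - _PREFIX[lo - 1] if lo <= hi else 0
-- ===== Notes on version B (the rewrite author's own statement) =====
-- stated objective: simpler
-- what changed: B replaces A's per-number string construction and summation over the whole range by a module-level prefix-sum table of closed-form letter counts for 1..1000, reducing each call to two table lookups and a subtraction.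
-- outside the precondition, e.g. on lenginnum(1001, 1002): A returns 36, B returns 0; on lenginnum(-5, -5): A returns 8, B returns 0
import Mathlib
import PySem

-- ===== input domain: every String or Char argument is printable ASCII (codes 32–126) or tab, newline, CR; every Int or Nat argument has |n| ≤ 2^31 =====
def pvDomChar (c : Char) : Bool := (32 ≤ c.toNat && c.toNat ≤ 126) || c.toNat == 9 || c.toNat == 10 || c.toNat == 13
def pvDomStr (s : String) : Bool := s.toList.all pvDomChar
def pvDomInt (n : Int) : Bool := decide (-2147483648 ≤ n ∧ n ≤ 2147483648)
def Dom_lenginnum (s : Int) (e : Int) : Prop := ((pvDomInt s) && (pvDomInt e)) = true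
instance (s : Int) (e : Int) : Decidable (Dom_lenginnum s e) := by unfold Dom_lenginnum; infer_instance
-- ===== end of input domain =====

-- B replaces A's per-number string building over the range by a precomputed prefix-sum
-- table of closed-form letter counts: each call becomes two table lookups (objective: simpler).

-- ===== PORT A =====
-- the module dict {1:'one', …}; values as char lists (strings are ported on List Char)
def aDic : PySem.Dict Int (List Char) := PySem.Dict.ofList
  [(1, ['o','n','e']), (2, ['t','w','o']), (3, ['t','h','r','e','e']), (4, ['f','o','u','r']),
   (5, ['f','i','v','e']), (6, ['s','i','x']), (7, ['s','e','v','e','n']), (8, ['e','i','g','h','t']),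
   (9, ['n','i','n','e']), (10, ['t','e','n']), (11, ['e','l','e','v','e','n']),
   (12, ['t','w','e','l','v','e']), (13, ['t','h','i','r','t','e','e','n']),
   (14, ['f','o','u','r','t','e','e','n']), (15, ['f','i','f','t','e','e','n']),
   (16, ['s','i','x','t','e','e','n']), (17, ['s','e','v','e','n','t','e','e','n']),
   (18, ['e','i','g','h','t','e','e','n']), (19, ['n','i','n','e','t','e','e','n']),
   (20, ['t','w','e','n','t','y']), (30, ['t','h','i','r','t','y']), (40, ['f','o','r','t','y']),
   (50, ['f','i','f','t','y']), (60, ['s','i','x','t','y']), (70, ['s','e','v','e','n','t','y']),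
   (80, ['e','i','g','h','t','y']), (90, ['n','i','n','e','t','y']),
   (100, ['h','u','n','d','r','e','d']), (1000, ['t','h','o','u','s','a','n','d'])]

-- Python str(o) for o = dic.get(…): the string itself, or 'None' for a missing key
def aStrOpt : Option (List Char) → List Char
  | some t => t
  | none => ['N','o','n','e']

-- int(t); .getD 0 only pads where Python raises ValueError (outside Pre_)
def aToI (t : List Char) : Int := (PySem.Int.ofChars? t).getD 0

-- str(x)[i] as a 1-char string; [] only where Python raises IndexError (never reached here)
def aChar (sx : List Char) (i : Int) : List Char :=
  ((PySem.List.pyGet? sx i).map (fun c => [c])).getD []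

-- the body of A's loop: the string appended for x; where Python raises (len(None),
-- None + str, int('-')) the port pads with [] / getD — all such x lie outside Pre_
def aSpell (x : Int) : List Char :=
  let sx := PySem.Int.toChars x
  if sx.length = 1 then (aDic.get? x).getD []
  else if 9 < x ∧ x < 20 then (aDic.get? x).getD []
  else if sx.length = 2 ∧ aToI (aChar sx 1) = 0 then (aDic.get? x).getD []
  else if sx.length = 2 then
    aStrOpt (aDic.get? (aToI (aChar sx 0 ++ ['0']))) ++ aStrOpt (aDic.get? (aToI (aChar sx 1)))
  else if sx.length = 3 ∧ aToI (aChar sx 1) = 0 ∧ aToI (aChar sx 2) = 0 then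
    (aDic.get? (aToI (aChar sx 0))).getD [] ++ ['h','u','n','d','r','e','d']
  else if sx.length = 3 ∧ aToI (aChar sx 1) = 0 ∧ aToI (aChar sx 2) ≠ 0 then
    aStrOpt (aDic.get? (aToI (aChar sx 0))) ++ ['h','u','n','d','r','e','d'] ++ ['a','n','d']
      ++ (aDic.get? (aToI (aChar sx 2))).getD []
  else if sx.length = 3 ∧ aToI (aChar sx 1) = 1 then
    aStrOpt (aDic.get? (aToI (aChar sx 0))) ++ ['h','u','n','d','r','e','d'] ++ ['a','n','d']
      ++ (aDic.get? (aToI (aChar sx 1 ++ aChar sx 2))).getD []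
  else if sx.length = 3 ∧ aToI (aChar sx 1) ≠ 0 ∧ aToI (aChar sx 2) = 0 then
    (aDic.get? (aToI (aChar sx 0))).getD [] ++ ['h','u','n','d','r','e','d'] ++ ['a','n','d']
      ++ aStrOpt (aDic.get? (aToI (PySem.List.slice sx (some 1) none)))
  else if sx.length = 3 ∧ aToI (aChar sx 1) ≠ 0 ∧ aToI (aChar sx 2) ≠ 0 then
    (aDic.get? (aToI (aChar sx 0))).getD [] ++ ['h','u','n','d','r','e','d'] ++ ['a','n','d']
      ++ aStrOpt (aDic.get? (aToI (aChar sx 1 ++ ['0']))) ++ aStrOpt (aDic.get? (aToI (aChar sx 2)))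
  else if sx.length = 4 ∧ aToI (aChar sx 1) = 0 ∧ aToI (aChar sx 2) = 0 ∧ aToI (aChar sx 3) = 0 then
    (aDic.get? (aToI (aChar sx 0))).getD [] ++ aStrOpt (aDic.get? x)
  else
    ['n','o','t','s','u','p','p','o','r','t','e','d','n','u','m','b','e','r']

def lenginnum (s : Int) (e : Int) : Int :=
  let string := (PySem.List.pyRange s (e + 1) 1).foldl (fun acc x => acc ++ [aSpell x]) []
  string.foldl (fun sumis t => sumis + (t.length : Int)) 0

-- ===== PORT B =====
def altOnes : List Int := [0, 3, 3, 5, 4, 4, 3, 5, 5, 4, 3, 6, 6, 8, 8, 7, 7, 9, 8, 8]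
def altTens : List Int := [0, 0, 6, 6, 5, 5, 5, 7, 6, 6]

-- _letters(n): closed-form letter count for 1 <= n <= 1000
def altLetters (n : Int) : Int :=
  if n = 1000 then 11
  else
    let h := PySem.Int.floordiv n 100
    let r := PySem.Int.mod n 100
    let total := if h ≠ 0 then
        (PySem.List.pyGet? altOnes h).getD 0 + 7 + (if r ≠ 0 then 3 else 0)
      else 0
    if r < 20 then total + (PySem.List.pyGet? altOnes r).getD 0
    else
      let t := PySem.Int.floordiv r 10
      let u := PySem.Int.mod r 10
      total + (PySem.List.pyGet? altTens t).getD 0 + (PySem.List.pyGet? altOnes u).getD 0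

-- the module-level prefix-sum table _PREFIX
def altPrefix : List Int :=
  (PySem.List.pyRange 1 1001 1).foldl
    (fun p n => p ++ [(PySem.List.pyGet? p (-1)).getD 0 + altLetters n]) [0]

def lenginnum_alt (s : Int) (e : Int) : Int :=
  let lo := max s 1
  let hi := min e 1000
  if lo ≤ hi then
    (PySem.List.pyGet? altPrefix hi).getD 0 - (PySem.List.pyGet? altPrefix (lo - 1)).getD 0
  else 0

-- ===== PRECONDITION & SPEC =====
-- Pre_ restricts to A's documented natural domain (docstring: 'limited up to 1000'):
-- empty ranges and ranges inside 1..1000.  It EXCLUDES inputs on which A still returns,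
-- namely nonempty ranges reaching outside 1..1000 where A's appended strings are accidents
-- of its implementation ('notsupportednumber', 'None'+name concatenations), and it excludes
-- the nonempty ranges containing 0 or a number in -99..-10, on which A raises
-- (TypeError: len(None) / ValueError: int('-')).
def Pre_lenginnum (s : Int) (e : Int) : Prop := e < s ∨ (1 ≤ s ∧ e ≤ 1000)
instance (s : Int) (e : Int) : Decidable (Pre_lenginnum s e) := by unfold Pre_lenginnum; infer_instance
def pvWitness_lenginnum : Int × Int := (1, 20)

def Spec_lenginnum (s : Int) (e : Int) (out : Int) : Prop := out = lenginnum_alt s e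
instance (s : Int) (e : Int) (out : Int) : Decidable (Spec_lenginnum s e out) := by unfold Spec_lenginnum; infer_instance

-- ===== CLAIM (what is proved, stated in full; the proofs are below) =====
def Claim_equal_lenginnum : Prop :=
  ∀ (s : Int) (e : Int), Dom_lenginnum s e → Pre_lenginnum s e → Spec_lenginnum s e (lenginnum s e)

-- ===== LEMMAS AND PROOFS =====

-- running sum of altLetters: S n = letters needed for 1..n
def S : Nat → Int
  | 0 => 0
  | n + 1 => S n + altLetters ((n : Int) + 1)

-- A's per-number string has exactly the closed-form length, checked for 1..1000
set_option maxRecDepth 100000 in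
set_option maxHeartbeats 4000000 in
theorem key_all :
    (List.range 1000).all
      (fun n => ((aSpell ((n : Int) + 1)).length : Int) == altLetters ((n : Int) + 1)) = true := by
  decide

theorem key (x : Int) (h1 : 1 ≤ x) (h2 : x ≤ 1000) :
    ((aSpell x).length : Int) = altLetters x := by
  have hm : x.toNat - 1 ∈ List.range 1000 := by
    simp only [List.mem_range]; omega
  have h := List.all_eq_true.mp key_all _ hm
  have hx : ((x.toNat - 1 : Nat) : Int) + 1 = x := by omega
  rw [hx] at h
  exact eq_of_beq h

theorem build (m : Nat) :
    (PySem.List.pyRange 1 ((m : Int) + 1) 1).foldl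
      (fun p n => p ++ [(PySem.List.pyGet? p (-1)).getD 0 + altLetters n]) [0]
    = (List.range (m + 1)).map S := by
  induction m with
  | zero =>
    rw [PySem.List.pyRange_one_eq_nil (by norm_num)]
    simp [S]
  | succ m ih =>
    have hsplit : PySem.List.pyRange 1 (((m + 1 : Nat) : Int) + 1) 1
        = PySem.List.pyRange 1 ((m : Int) + 1) 1 ++ [(m : Int) + 1] := by
      have := PySem.List.pyRange_one_succ_right (a := 1) (b := (m : Int) + 1) (by omega)
      push_cast
      push_cast at this
      exact this
    rw [hsplit, List.foldl_append, ih]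
    have hlast : (PySem.List.pyGet? ((List.range (m + 1)).map S) (-1)).getD 0 = S m := by
      rw [PySem.List.pyGet?_neg_one]
      rw [List.range_succ, List.map_append]
      simp
    simp only [List.foldl_cons, List.foldl_nil, hlast]
    rw [List.range_succ (n := m + 1), List.map_append]
    simp [S]

theorem prefix_eq : altPrefix = (List.range 1001).map S := by
  have h := build 1000
  norm_num at h
  rw [altPrefix]
  exact h

theorem get_prefix (k : Nat) (hk : k ≤ 1000) :
    (PySem.List.pyGet? altPrefix (k : Int)).getD 0 = S k := by
  rw [prefix_eq, PySem.List.pyGet?_natCast]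
  rw [List.getElem?_map, List.getElem?_range (by omega)]
  rfl

theorem S_succ_int (x : Int) (hx : 1 ≤ x) :
    S x.toNat = S (x - 1).toNat + altLetters x := by
  have h : x.toNat = (x - 1).toNat + 1 := by omega
  rw [h]
  show S ((x-1).toNat) + altLetters (((x - 1).toNat : Int) + 1) = _
  have hc : ((x - 1).toNat : Int) + 1 = x := by omega
  rw [hc]

theorem sumRange (n : Nat) : ∀ (s : Int), 1 ≤ s → s + n ≤ 1001 →
    ((PySem.List.pyRange s (s + (n : Int)) 1).map (fun x => ((aSpell x).length : Int))).sum
      = S (s + n - 1).toNat - S (s - 1).toNat := by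
  induction n with
  | zero =>
    intro s hs _
    rw [PySem.List.pyRange_one_eq_nil (by omega)]
    simp
  | succ n ih =>
    intro s hs hb
    have hsplit : PySem.List.pyRange s (s + ((n + 1 : Nat) : Int)) 1
        = PySem.List.pyRange s (s + (n : Int)) 1 ++ [s + (n : Int)] := by
      have := PySem.List.pyRange_one_succ_right (a := s) (b := s + (n : Int)) (by omega)
      push_cast
      rw [show s + ((n : Int) + 1) = s + (n : Int) + 1 by ring]
      exact this
    rw [hsplit, List.map_append, List.sum_append]
    rw [ih s hs (by push_cast at hb ⊢; omega)]
    simp only [List.map_cons, List.map_nil, List.sum_cons, List.sum_nil]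
    rw [key (s + (n : Int)) (by omega) (by push_cast at hb; omega)]
    have h1 : S (s + ((n + 1 : Nat) : Int) - 1).toNat
        = S (s + (n : Int) - 1).toNat + altLetters (s + (n : Int)) := by
      have := S_succ_int (s + (n : Int)) (by omega)
      have hc : s + ((n + 1 : Nat) : Int) - 1 = s + (n : Int) := by push_cast; ring
      rw [hc]
      exact this
    rw [h1]
    ring

theorem lenA (s e : Int) :
    lenginnum s e
      = ((PySem.List.pyRange s (e + 1) 1).map (fun x => ((aSpell x).length : Int))).sum := by
  unfold lenginnum
  rw [PySem.List.foldl_append_singleton_eq_map, List.nil_append]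
  rw [PySem.List.foldl_add (g := fun t => ((t : List Char).length : Int))]
  rw [List.map_map]
  simp [Function.comp_def]

-- ===== VERDICT (by name: the statement is the Claim_ definition above) =====
theorem lenginnum_spec : Claim_equal_lenginnum := by
  intro s e _ hpre
  unfold Spec_lenginnum lenginnum_alt
  by_cases hse : s ≤ e
  · -- nonempty range: Pre_ forces 1 ≤ s ∧ e ≤ 1000
    have hs1 : 1 ≤ s := by rcases hpre with h | h <;> omega
    have he : e ≤ 1000 := by rcases hpre with h | h <;> omega
    have hlo : max s 1 = s := by omega
    have hhi : min e 1000 = e := by omega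
    rw [hlo, hhi, if_pos hse]
    have hget1 : (PySem.List.pyGet? altPrefix e).getD 0 = S e.toNat := by
      have hc : ((e.toNat : Nat) : Int) = e := by omega
      rw [← hc]
      exact get_prefix e.toNat (by omega)
    have hget2 : (PySem.List.pyGet? altPrefix (s - 1)).getD 0 = S (s - 1).toNat := by
      have hc : (((s - 1).toNat : Nat) : Int) = s - 1 := by omega
      rw [← hc]
      exact get_prefix (s - 1).toNat (by omega)
    rw [hget1, hget2, lenA]
    have hn : e + 1 = s + ((e + 1 - s).toNat : Int) := by omega
    rw [hn, sumRange (e + 1 - s).toNat s hs1 (by omega)]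
    have : s + ((e + 1 - s).toNat : Int) - 1 = e := by omega
    rw [this]
  · -- empty range: both sides are 0
    rw [lenA, PySem.List.pyRange_one_eq_nil (by omega)]
    rw [if_neg (by omega)]
    simp
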